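-- pv_equiv track=rewrite | github.com/lake041/algorithm | .ref/python/cominations 비교.py | custom_combi
-- ===== SOURCE A (Python) =====
-- def custom_combi(arr, n):
--     result = []
--     if n == 0:
--         return [[]]
--
--     for i in range(len(arr)):
--         element = arr[i]
--         rest_arr = arr[i+2:]
--         for rest_combi in custom_combi(rest_arr, n-1):
--             result.append([element] + rest_combi)
--
--     return result
-- ===== SOURCE B (Python) =====
-- def custom_combi(arr, n):
--     if n == 0:
--         return [[]]
--     if not arr:
--         return []
--     return [[arr[0]] + rest for rest in custom_combi(arr[2:], n - 1)] \
--         + custom_combi(arr[1:], n)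
-- ===== Notes on version B (the rewrite author's own statement) =====
-- stated objective: alternative
-- what changed: Replaced the flat loop over all starting positions with an include/exclude binary recursion on the head element (include-head results first, then exclude-head), with the same base cases and output order.
import Mathlib
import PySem

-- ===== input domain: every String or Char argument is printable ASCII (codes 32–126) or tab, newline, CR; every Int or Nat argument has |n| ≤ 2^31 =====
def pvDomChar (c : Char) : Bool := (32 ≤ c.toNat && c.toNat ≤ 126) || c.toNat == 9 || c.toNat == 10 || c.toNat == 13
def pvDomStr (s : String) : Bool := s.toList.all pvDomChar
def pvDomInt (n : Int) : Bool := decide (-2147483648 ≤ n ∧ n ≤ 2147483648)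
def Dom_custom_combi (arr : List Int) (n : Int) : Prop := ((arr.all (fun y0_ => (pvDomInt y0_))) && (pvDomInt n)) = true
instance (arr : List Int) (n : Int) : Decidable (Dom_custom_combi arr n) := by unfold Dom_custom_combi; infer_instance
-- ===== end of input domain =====

-- B replaces A's flat loop over all starting positions by an include/exclude
-- binary recursion on the head element (same output, same order); objective: alternative.

-- ===== PORT A =====
-- A: result accumulator; for i in range(len(arr)): element = arr[i]; rest_arr = arr[i+2:];
--    inner loop appends [element] + rest_combi for each recursive combination.
def custom_combi (arr : List Int) (n : Int) : List (List Int) :=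
  if n == 0 then [[]]
  else
    (List.range arr.length).attach.foldl
      (fun result i =>
        result ++ (custom_combi (PySem.List.slice arr (some ((i.1 : Int) + 2)) none) (n - 1)).map
          (fun rest_combi => arr.getD i.1 0 :: rest_combi))
      []
termination_by arr.length
decreasing_by
  have hi := i.2
  simp [List.mem_range] at hi
  have h2 : ((i.1 : Int) + 2) = ((i.1 + 2 : Nat) : Int) := by push_cast; ring
  rw [h2, PySem.List.slice_from_natCast]
  simp
  omega

-- ===== PORT B =====
-- B: base cases n == 0 → [[]] and empty arr → []; else include-head part
--    ([arr[0]] + rest for rest in custom_combi(arr[2:], n-1)) then exclude-head part.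
def custom_combi_alt (arr : List Int) (n : Int) : List (List Int) :=
  if n == 0 then [[]]
  else
    match arr with
    | [] => []
    | x :: rest =>
        (custom_combi_alt (PySem.List.slice (x :: rest) (some 2) none) (n - 1)).map
          (fun r => x :: r)
        ++ custom_combi_alt rest n
termination_by arr.length
decreasing_by
  all_goals simp [PySem.List.slice, PySem.List.clampIdx]

-- ===== PRECONDITION & SPEC =====
def Spec_custom_combi (arr : List Int) (n : Int) (out : List (List Int)) : Prop := out = custom_combi_alt arr n
instance (arr : List Int) (n : Int) (out : List (List Int)) : Decidable (Spec_custom_combi arr n out) := by unfold Spec_custom_combi; infer_instance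

-- ===== CLAIM (what is proved, stated in full; the proofs are below) =====
def Claim_equal_custom_combi : Prop := ∀ (arr : List Int) (n : Int), Dom_custom_combi arr n → Spec_custom_combi arr n (custom_combi arr n)

-- ===== LEMMAS AND PROOFS =====

lemma pv_slice2 (arr : List Int) : PySem.List.slice arr (some 2) none = arr.drop 2 := by
  have h : (2 : Int) = ((2 : Nat) : Int) := by norm_num
  rw [h, PySem.List.slice_from_natCast]

lemma pv_flatMap_attach {α β : Type} (l : List α) (g : α → List β) :
    l.attach.flatMap (fun i => g i.1) = l.flatMap g := by
  induction l with
  | nil => simp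
  | cons a t ih => simp [List.flatMap_map, ih]

lemma pv_combi_flatMap (arr : List Int) (n : Int) (h : ¬ n = 0) :
    custom_combi arr n =
      (List.range arr.length).flatMap
        (fun i => (custom_combi (arr.drop (i + 2)) (n - 1)).map (fun r => arr.getD i 0 :: r)) := by
  rw [custom_combi, if_neg (by simpa using h)]
  rw [PySem.List.foldl_append_eq_flatMap, List.nil_append,
    pv_flatMap_attach (List.range arr.length)
      (fun i => (custom_combi (PySem.List.slice arr (some ((i : Int) + 2)) none) (n - 1)).map
        (fun rest_combi => arr.getD i 0 :: rest_combi))]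
  apply List.flatMap_congr
  intro i _
  have h2 : ((i : Int) + 2) = ((i + 2 : Nat) : Int) := by push_cast; ring
  rw [h2, PySem.List.slice_from_natCast]

lemma pv_combi_eq_aux : ∀ (k : Nat) (arr : List Int), arr.length ≤ k →
    ∀ n, custom_combi arr n = custom_combi_alt arr n := by
  intro k
  induction k with
  | zero =>
    intro arr hlen n
    have harr : arr = [] := by cases arr <;> simp_all
    subst harr
    by_cases h : n = 0
    · subst h; rw [custom_combi, custom_combi_alt]; simp
    · rw [pv_combi_flatMap _ _ h]; simp [custom_combi_alt, h]
  | succ k ih =>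
    intro arr hlen n
    by_cases h : n = 0
    · subst h; rw [custom_combi, custom_combi_alt.eq_def]; simp
    · cases arr with
      | nil => rw [pv_combi_flatMap _ _ h]; simp [custom_combi_alt, h]
      | cons x rest =>
        rw [pv_combi_flatMap _ _ h, custom_combi_alt]
        simp only [beq_iff_eq, if_neg h]
        rw [pv_slice2]
        simp only [List.length_cons, List.range_succ_eq_map, List.flatMap_cons,
          List.flatMap_map]
        congr 1
        · rw [← ih (List.drop 2 (x :: rest)) (by simp at hlen ⊢; omega) (n - 1)]
          simp
        · rw [← ih rest (by simp at hlen; omega) n, pv_combi_flatMap rest n h]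
          apply List.flatMap_congr
          intro i _
          simp [List.getD]

-- ===== VERDICT (by name: the statement is the Claim_ definition above) =====
theorem custom_combi_spec : Claim_equal_custom_combi := by
  intro arr n _
  unfold Spec_custom_combi
  exact pv_combi_eq_aux arr.length arr le_rfl n
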